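-- pv_equiv track=rewrite | github.com/ActiveState/OpenKomodoIDE | src/toolbox/sublime.py | _convertSublimeVarsToShortcuts
-- ===== SOURCE A (Python) =====
-- def _convertSublimeVarsToShortcuts(content):
--     # Currently this will replace embedded Sublime vars inside
--     # tabstops which isn't supported in Komodo.  Things break bad
--     subVarsToShortcuts = {
--         "$SELECTION" : "require(\"ko/editor\").getColumnNumber()",
--         "$TM_CURRENT_LINE" : "require(\"ko/editor\").getLine()",
--         "$TM_CURRENT_WORD" : "require(\"ko/editor\").getWord()",
--         "$TM_FILENAME" : "require(\"ko/views\").current().get().koDoc.baseName",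
--         "$TM_FILEPATH" : "require(\"ko/views\").current().get().koDoc.displayPath",
--         "$TM_FULLNAME" : "require(\"sdk/system\").env.USERNAME ? require(\"sdk/system\").env.USERNAME : require(\"sdk/system\").env.USER",
--         "$TM_LINE_INDEX" : "require(\"ko/editor\").getColumnNumber()",
--         "$TM_LINE_NUMBER" : "require(\"ko/editor\").getLineNumber()",
--         "$TM_SELECTED_TEXT" : "require(\"ko/editor\").getColumnNumber()",
--         "$TM_TAB_SIZE" : "require(\"ko/views\").current().get().koDoc.tabWidth"
--         }
--     for key, value in subVarsToShortcuts.items():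
--         content = content.replace(key, "<%= "+value+" %>")
--     return content
-- ===== SOURCE B (Python) =====
-- def _convertSublimeVarsToShortcuts(content):
--     # Single left-to-right scan: at each '$' try the variable names once,
--     # emit the wrapped shortcut and skip the matched variable; every other
--     # character is copied through.  One pass instead of ten full-string passes.
--     subVarsToShortcuts = {
--         "$SELECTION" : "require(\"ko/editor\").getColumnNumber()",
--         "$TM_CURRENT_LINE" : "require(\"ko/editor\").getLine()",
--         "$TM_CURRENT_WORD" : "require(\"ko/editor\").getWord()",
--         "$TM_FILENAME" : "require(\"ko/views\").current().get().koDoc.baseName",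
--         "$TM_FILEPATH" : "require(\"ko/views\").current().get().koDoc.displayPath",
--         "$TM_FULLNAME" : "require(\"sdk/system\").env.USERNAME ? require(\"sdk/system\").env.USERNAME : require(\"sdk/system\").env.USER",
--         "$TM_LINE_INDEX" : "require(\"ko/editor\").getColumnNumber()",
--         "$TM_LINE_NUMBER" : "require(\"ko/editor\").getLineNumber()",
--         "$TM_SELECTED_TEXT" : "require(\"ko/editor\").getColumnNumber()",
--         "$TM_TAB_SIZE" : "require(\"ko/views\").current().get().koDoc.tabWidth"
--         }
--     out = []
--     i = 0
--     n = len(content)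
--     while i < n:
--         matched = None
--         if content[i] == "$":
--             for key, value in subVarsToShortcuts.items():
--                 if content.startswith(key, i):
--                     matched = (key, value)
--                     break
--         if matched is None:
--             out.append(content[i])
--             i += 1
--         else:
--             out.append("<%= " + matched[1] + " %>")
--             i += len(matched[0])
--     return "".join(out)
-- ===== Notes on version B (the rewrite author's own statement) =====
-- stated objective: alternative
-- what changed: A rewrites the whole string once per table entry (ten sequential str.replace passes); B makes a single left-to-right scan that matches a variable name at most once per position and emits the wrapped shortcut inline, so the string is traversed once instead of ten times.
import Mathlib
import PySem

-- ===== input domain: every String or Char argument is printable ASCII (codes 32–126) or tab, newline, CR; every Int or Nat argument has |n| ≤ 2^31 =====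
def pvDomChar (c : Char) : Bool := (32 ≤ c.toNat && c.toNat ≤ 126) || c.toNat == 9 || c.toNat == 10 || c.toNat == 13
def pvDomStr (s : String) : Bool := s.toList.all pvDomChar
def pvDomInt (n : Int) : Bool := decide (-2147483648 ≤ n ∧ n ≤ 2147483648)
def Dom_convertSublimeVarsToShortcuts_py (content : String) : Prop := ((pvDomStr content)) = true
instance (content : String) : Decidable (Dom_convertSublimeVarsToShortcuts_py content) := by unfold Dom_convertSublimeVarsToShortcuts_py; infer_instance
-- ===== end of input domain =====

-- B replaces A's ten sequential full-string replace passes by one left-to-right scan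
-- that substitutes every Sublime variable in a single pass (objective: alternative).

-- ===== PORT A =====
def convertSublimeVarsToShortcuts_py (content : String) : String :=
  let subVarsToShortcuts : PySem.Dict String String := PySem.Dict.mk [
    ("$SELECTION", "require(\"ko/editor\").getColumnNumber()"),
    ("$TM_CURRENT_LINE", "require(\"ko/editor\").getLine()"),
    ("$TM_CURRENT_WORD", "require(\"ko/editor\").getWord()"),
    ("$TM_FILENAME", "require(\"ko/views\").current().get().koDoc.baseName"),
    ("$TM_FILEPATH", "require(\"ko/views\").current().get().koDoc.displayPath"),
    ("$TM_FULLNAME", "require(\"sdk/system\").env.USERNAME ? require(\"sdk/system\").env.USERNAME : require(\"sdk/system\").env.USER"),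
    ("$TM_LINE_INDEX", "require(\"ko/editor\").getColumnNumber()"),
    ("$TM_LINE_NUMBER", "require(\"ko/editor\").getLineNumber()"),
    ("$TM_SELECTED_TEXT", "require(\"ko/editor\").getColumnNumber()"),
    ("$TM_TAB_SIZE", "require(\"ko/views\").current().get().koDoc.tabWidth")]
  subVarsToShortcuts.items.foldl
    (fun content kv => PySem.Str.replace content kv.1 ("<%= " ++ kv.2 ++ " %>")) content

-- ===== PORT B =====
-- the same lookup table, over List Char for Source B's scanner
def pvTableB : List (List Char × List Char) := [
    ("$SELECTION".toList, "require(\"ko/editor\").getColumnNumber()".toList),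
    ("$TM_CURRENT_LINE".toList, "require(\"ko/editor\").getLine()".toList),
    ("$TM_CURRENT_WORD".toList, "require(\"ko/editor\").getWord()".toList),
    ("$TM_FILENAME".toList, "require(\"ko/views\").current().get().koDoc.baseName".toList),
    ("$TM_FILEPATH".toList, "require(\"ko/views\").current().get().koDoc.displayPath".toList),
    ("$TM_FULLNAME".toList, "require(\"sdk/system\").env.USERNAME ? require(\"sdk/system\").env.USERNAME : require(\"sdk/system\").env.USER".toList),
    ("$TM_LINE_INDEX".toList, "require(\"ko/editor\").getColumnNumber()".toList),
    ("$TM_LINE_NUMBER".toList, "require(\"ko/editor\").getLineNumber()".toList),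
    ("$TM_SELECTED_TEXT".toList, "require(\"ko/editor\").getColumnNumber()".toList),
    ("$TM_TAB_SIZE".toList, "require(\"ko/views\").current().get().koDoc.tabWidth".toList)]

-- the while loop of Source B: copy a char, or at '$' take the first matching key and skip it
def pvScanB (cs : List Char) : List Char :=
  match cs with
  | [] => []
  | c :: t =>
    if c = '$' then
      match pvTableB.find? (fun e => e.1.isPrefixOf (c :: t)) with
      | some e => "<%= ".toList ++ e.2 ++ " %>".toList ++ pvScanB (t.drop (e.1.length - 1))
      | none => c :: pvScanB t
    else c :: pvScanB t
termination_by cs.length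
decreasing_by all_goals (simp; try omega)

def convertSublimeVarsToShortcuts_py_alt (content : String) : String :=
  String.ofList (pvScanB content.toList)

-- ===== PRECONDITION & SPEC =====
def Spec_convertSublimeVarsToShortcuts_py (content : String) (out : String) : Prop := out = convertSublimeVarsToShortcuts_py_alt content
instance (content : String) (out : String) : Decidable (Spec_convertSublimeVarsToShortcuts_py content out) := by unfold Spec_convertSublimeVarsToShortcuts_py; infer_instance

-- ===== CLAIM (what is proved, stated in full; the proofs are below) =====
def Claim_equal_convertSublimeVarsToShortcuts_py : Prop := ∀ (content : String), Dom_convertSublimeVarsToShortcuts_py content → Spec_convertSublimeVarsToShortcuts_py content (convertSublimeVarsToShortcuts_py content)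

-- ===== LEMMAS AND PROOFS =====

-- A's (key, value) pairs, named for the proofs (A's port keeps its own literal)
def pvPairsA : List (String × String) := [
    ("$SELECTION", "require(\"ko/editor\").getColumnNumber()"),
    ("$TM_CURRENT_LINE", "require(\"ko/editor\").getLine()"),
    ("$TM_CURRENT_WORD", "require(\"ko/editor\").getWord()"),
    ("$TM_FILENAME", "require(\"ko/views\").current().get().koDoc.baseName"),
    ("$TM_FILEPATH", "require(\"ko/views\").current().get().koDoc.displayPath"),
    ("$TM_FULLNAME", "require(\"sdk/system\").env.USERNAME ? require(\"sdk/system\").env.USERNAME : require(\"sdk/system\").env.USER"),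
    ("$TM_LINE_INDEX", "require(\"ko/editor\").getColumnNumber()"),
    ("$TM_LINE_NUMBER", "require(\"ko/editor\").getLineNumber()"),
    ("$TM_SELECTED_TEXT", "require(\"ko/editor\").getColumnNumber()"),
    ("$TM_TAB_SIZE", "require(\"ko/views\").current().get().koDoc.tabWidth")]

-- "<%= value %>"
def pvWrap (v : List Char) : List Char := "<%= ".toList ++ v ++ " %>".toList

-- recursive characterization of Python's str.replace (for a nonempty pattern)
def pvRepl (old new : List Char) (cs : List Char) : List Char :=
  match cs with
  | [] => []
  | c :: t =>
    if old.isPrefixOf (c :: t) then new ++ pvRepl old new (t.drop (old.length - 1))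
    else c :: pvRepl old new t
termination_by cs.length
decreasing_by all_goals (simp; try omega)

-- simultaneous one-pass substitution for an arbitrary table (first matching key wins)
def pvScan (Tb : List (List Char × List Char)) (cs : List Char) : List Char :=
  match cs with
  | [] => []
  | c :: t =>
    match Tb.find? (fun e => e.1.isPrefixOf (c :: t)) with
    | some e => pvWrap e.2 ++ pvScan Tb (t.drop (e.1.length - 1))
    | none => c :: pvScan Tb t
termination_by cs.length
decreasing_by all_goals (simp; try omega)

-- table sanity: keys nonempty, start with '$', '$' only at the head, no '<' in a key,
-- no '$' in a value, and no key a prefix of another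
def pvGoodE (e : List Char × List Char) : Prop :=
  e.1 ≠ [] ∧ e.1.head? = some '$' ∧ '$' ∉ e.1.tail ∧ '<' ∉ e.1 ∧ '$' ∉ e.2
def pvGood (Tb : List (List Char × List Char)) : Prop :=
  (∀ e ∈ Tb, pvGoodE e) ∧ Tb.Pairwise (fun a b => ¬ a.1 <+: b.1 ∧ ¬ b.1 <+: a.1)

lemma pvRepl_nil (old new : List Char) : pvRepl old new [] = [] := by
  rw [pvRepl]

lemma pvRepl_cons_pos (old new : List Char) (c : Char) (t : List Char)
    (h : old <+: c :: t) :
    pvRepl old new (c :: t) = new ++ pvRepl old new (t.drop (old.length - 1)) := by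
  rw [pvRepl]; simp [List.isPrefixOf_iff_prefix, h]

lemma pvRepl_cons_neg (old new : List Char) (c : Char) (t : List Char)
    (h : ¬ old <+: c :: t) :
    pvRepl old new (c :: t) = c :: pvRepl old new t := by
  rw [pvRepl]; simp [List.isPrefixOf_iff_prefix, h]

lemma pvScan_nil (Tb : List (List Char × List Char)) : pvScan Tb [] = [] := by
  rw [pvScan]

lemma pvScan_cons_some (Tb : List (List Char × List Char)) (c : Char) (t : List Char)
    (e : List Char × List Char)
    (h : Tb.find? (fun e => e.1.isPrefixOf (c :: t)) = some e) :
    pvScan Tb (c :: t) = pvWrap e.2 ++ pvScan Tb (t.drop (e.1.length - 1)) := by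
  rw [pvScan]; simp [h]

lemma pvScan_cons_none (Tb : List (List Char × List Char)) (c : Char) (t : List Char)
    (h : Tb.find? (fun e => e.1.isPrefixOf (c :: t)) = none) :
    pvScan Tb (c :: t) = c :: pvScan Tb t := by
  rw [pvScan]; simp [h]

-- the fuel/accumulator loop of PySem.Chars.replace computes pvRepl
lemma pv_go_eq (old new : List Char) (h : old ≠ []) :
    ∀ (fuel : Nat) (l acc : List Char), l.length ≤ fuel →
      PySem.Chars.replace.go old new fuel l acc = acc.reverse ++ pvRepl old new l := by
  intro fuel
  induction fuel with
  | zero =>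
    intro l acc hl
    have hnil : l = [] := by cases l <;> simp_all
    subst hnil
    rw [show PySem.Chars.replace.go old new 0 [] acc = acc.reverse ++ [] from by
      rw [PySem.Chars.replace.go.eq_def], pvRepl_nil]
  | succ fuel ih =>
    intro l acc hl
    match l with
    | [] =>
      rw [show PySem.Chars.replace.go old new (fuel + 1) [] acc = acc.reverse from by
        rw [PySem.Chars.replace.go.eq_def], pvRepl_nil]
      simp
    | c :: t =>
      have hstep : PySem.Chars.replace.go old new (fuel + 1) (c :: t) acc =
          if old.isPrefixOf (c :: t) then
            PySem.Chars.replace.go old new fuel (List.drop old.length (c :: t)) (new.reverse ++ acc)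
          else PySem.Chars.replace.go old new fuel t (c :: acc) := by
        rw [PySem.Chars.replace.go.eq_def]
      rw [hstep]
      by_cases hp : old <+: c :: t
      · have hb : old.isPrefixOf (c :: t) = true := List.isPrefixOf_iff_prefix.mpr hp
        rw [hb, if_pos rfl]
        have hlen : 1 ≤ old.length := by cases old <;> simp_all
        have hdrop : List.drop old.length (c :: t) = t.drop (old.length - 1) := by
          obtain ⟨m, hm⟩ := Nat.exists_eq_succ_of_ne_zero (show old.length ≠ 0 by omega)
          rw [hm]; simp
        have hlt : (t.drop (old.length - 1)).length ≤ fuel := by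
          simp only [List.length_drop]
          simp at hl; omega
        rw [hdrop, ih _ _ hlt, pvRepl_cons_pos old new c t hp]
        simp
      · have hb : old.isPrefixOf (c :: t) = false := by
          rw [Bool.eq_false_iff]
          intro hx
          exact hp (List.isPrefixOf_iff_prefix.mp hx)
        rw [hb, if_neg (by simp)]
        have hlt : t.length ≤ fuel := by simp at hl; omega
        rw [ih _ _ hlt, pvRepl_cons_neg old new c t hp]
        simp

lemma pv_replace_eq (old new s : List Char) (h : old ≠ []) :
    PySem.Chars.replace s old new = pvRepl old new s := by
  have hne : old.isEmpty = false := by cases old <;> simp_all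
  rw [PySem.Chars.replace, if_neg (by simp [hne])]
  simpa using pv_go_eq old new h s.length s [] le_rfl

-- a nonempty prefix fixes the head
lemma pv_prefix_head {p l : List Char} (hp : p ≠ []) (h : p <+: l) : l.head? = p.head? := by
  obtain ⟨t, rfl⟩ := h
  cases p <;> simp_all

-- pvRepl skips over a block in which no occurrence of the pattern starts
lemma pvRepl_append_left (k nv : List Char) :
    ∀ (a b : List Char), (∀ i < a.length, ¬ k <+: (a.drop i ++ b)) →
      pvRepl k nv (a ++ b) = a ++ pvRepl k nv b := by
  intro a
  induction a with
  | nil => intro b _; simp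
  | cons c t ih =>
    intro b H
    have h0 : ¬ k <+: c :: (t ++ b) := by simpa using H 0 (by simp)
    have hexp := ih b (fun i hi => by simpa using H (i + 1) (by simp; omega))
    rw [List.cons_append, pvRepl_cons_neg k nv _ _ h0, hexp]
    simp

-- no occurrence of a '$'-headed pattern starts inside a '$'-free block
lemma pv_no_start (k a b : List Char) (hk : k.head? = some '$')
    (ha : ∀ c ∈ a, c ≠ '$') : ∀ i < a.length, ¬ k <+: (a.drop i ++ b) := by
  intro i hi h
  have hkne : k ≠ [] := by cases k <;> simp_all
  have hhead := pv_prefix_head hkne h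
  have hd : (a.drop i).head? = some a[i] := by
    rw [List.head?_drop, List.getElem?_eq_getElem hi]
  have hab : (a.drop i ++ b).head? = some a[i] := by
    rw [List.head?_append_of_ne_nil]
    · exact hd
    · intro hnil; rw [hnil] at hd; simp at hd
  rw [hab, hk] at hhead
  exact ha a[i] (List.getElem_mem hi) (Option.some.inj hhead)

-- the scan skips over a block in which no key matches
lemma pvScan_append_left (Tb : List (List Char × List Char)) :
    ∀ (a b : List Char), (∀ i < a.length, ∀ e ∈ Tb, ¬ e.1 <+: (a.drop i ++ b)) →
      pvScan Tb (a ++ b) = a ++ pvScan Tb b := by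
  intro a
  induction a with
  | nil => intro b _; simp
  | cons c t ih =>
    intro b H
    have hnone : Tb.find? (fun e => e.1.isPrefixOf (c :: (t ++ b))) = none := by
      rw [List.find?_eq_none]
      intro e he
      have := H 0 (by simp) e he
      simpa [List.isPrefixOf_iff_prefix] using this
    have hexp := ih b (fun i hi e he => by simpa using H (i + 1) (by simp; omega) e he)
    rw [List.cons_append, pvScan_cons_none Tb _ _ hnone, hexp]
    simp

-- a '<'-free nonempty prefix of the scan's output is a prefix of the input
lemma pv_prefix_scan (Tb : List (List Char × List Char)) :
    ∀ (n : Nat) (s : List Char), s.length ≤ n → ∀ (w : List Char), w ≠ [] → '<' ∉ w →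
      w <+: pvScan Tb s → w <+: s := by
  intro n
  induction n with
  | zero =>
    intro s hs w hw _ hpre
    have : s = [] := by cases s <;> simp_all
    subst this
    rw [pvScan_nil] at hpre
    simp_all
  | succ n ih =>
    intro s hs w hw hlt hpre
    match s with
    | [] => rw [pvScan_nil] at hpre; simp_all
    | c :: t =>
      cases hfind : Tb.find? (fun e => e.1.isPrefixOf (c :: t)) with
      | some e =>
        rw [pvScan_cons_some Tb c t e hfind] at hpre
        have hhead := pv_prefix_head hw hpre
        have : w.head? = some '<' := by
          rw [← hhead]; simp [pvWrap]
        exfalso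
        apply hlt
        cases w with
        | nil => simp_all
        | cons w0 w' => simp at this; simp [this]
      | none =>
        rw [pvScan_cons_none Tb c t hfind] at hpre
        cases w with
        | nil => simp_all
        | cons w0 w' =>
          rw [List.cons_prefix_cons] at hpre ⊢
          obtain ⟨rfl, hw'⟩ := hpre
          refine ⟨rfl, ?_⟩
          rcases eq_or_ne w' [] with rfl | hw'ne
          · simp
          · exact ih t (by simp at hs; omega) w' hw'ne
              (fun h => hlt (List.mem_cons_of_mem _ h)) hw'

lemma pvGood_append_left (T T' : List (List Char × List Char)) (h : pvGood (T ++ T')) :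
    pvGood T :=
  ⟨fun e he => h.1 e (List.mem_append_left _ he), (List.pairwise_append.mp h.2).1⟩

-- chars of a wrapped value are not '$'
lemma pv_wrap_no_dollar (v : List Char) (hv : '$' ∉ v) : ∀ c ∈ pvWrap v, c ≠ '$' := by
  intro c hc hceq
  subst hceq
  rw [pvWrap, List.mem_append, List.mem_append] at hc
  rcases hc with (h | h) | h
  · exact absurd h (by decide)
  · exact hv h
  · exact absurd h (by decide)

-- positions > 0 of a good key are not '$'
lemma pv_key_no_inner_dollar (k v : List Char) (hk : pvGoodE (k, v))
    (i : Nat) (h1 : 1 ≤ i) (hi : i < k.length) : k[i] ≠ '$' := by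
  obtain ⟨hne, hhd, htl, -, -⟩ := hk
  intro heq
  apply htl
  have h' : i - 1 < k.tail.length := by
    cases k with
    | nil => simp at hi
    | cons a l => simp at hi ⊢; omega
  have h3 : k.tail[i - 1]? = some k[i] := by
    rw [List.getElem?_tail, show i - 1 + 1 = i from by omega, List.getElem?_eq_getElem hi]
  rw [← heq]
  exact List.mem_of_getElem? h3

-- KEY STEP: one more sequential replace pass equals the scan with one more table entry
lemma pv_step (Tb : List (List Char × List Char)) (k v : List Char)
    (hG : pvGood (Tb ++ [(k, v)])) :
    ∀ (n : Nat) (s : List Char), s.length ≤ n →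
      pvRepl k (pvWrap v) (pvScan Tb s) = pvScan (Tb ++ [(k, v)]) s := by
  have hGT : pvGood Tb := pvGood_append_left _ _ hG
  have hke : pvGoodE (k, v) := hG.1 (k, v) (by simp)
  have hkne : k ≠ [] := hke.1
  intro n
  induction n with
  | zero =>
    intro s hs
    have : s = [] := by cases s <;> simp_all
    subst this
    rw [pvScan_nil, pvScan_nil, pvRepl_nil]
  | succ n ih =>
    intro s hs
    match s with
    | [] => rw [pvScan_nil, pvScan_nil, pvRepl_nil]
    | c :: t =>
      cases hfind : Tb.find? (fun e => e.1.isPrefixOf (c :: t)) with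
      | some e =>
        have he : e ∈ Tb := List.mem_of_find?_eq_some hfind
        have hfind' : (Tb ++ [(k, v)]).find? (fun e => e.1.isPrefixOf (c :: t)) = some e := by
          rw [List.find?_append, hfind]; rfl
        have hlt : (t.drop (e.1.length - 1)).length ≤ n := by
          simp only [List.length_drop]; simp at hs; omega
        rw [pvScan_cons_some Tb c t e hfind,
          pvRepl_append_left k (pvWrap v) _ _
            (pv_no_start k _ _ hke.2.1 (pv_wrap_no_dollar e.2 (hGT.1 e he).2.2.2.2)),
          ih _ hlt, pvScan_cons_some _ c t e hfind']
      | none =>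
        by_cases hk : k <+: c :: t
        · obtain ⟨r, hr⟩ := hk
          have hscan : pvScan Tb (c :: t) = k ++ pvScan Tb r := by
            rw [← hr]
            apply pvScan_append_left
            intro i hi e he hpre
            rcases Nat.eq_zero_or_pos i with rfl | hpos
            · rw [List.drop_zero, hr] at hpre
              have := List.find?_eq_none.mp hfind e he
              simp [List.isPrefixOf_iff_prefix] at this
              exact this hpre
            · have hene : e.1 ≠ [] := (hGT.1 e he).1
              have hhead := pv_prefix_head hene hpre
              have hd : (k.drop i).head? = some k[i] := by
                rw [List.head?_drop, List.getElem?_eq_getElem hi]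
              have hab : (k.drop i ++ r).head? = some k[i] := by
                rw [List.head?_append_of_ne_nil]
                · exact hd
                · intro hnil; rw [hnil] at hd; simp at hd
              rw [hab, (hGT.1 e he).2.1] at hhead
              exact pv_key_no_inner_dollar k v hke i hpos hi (Option.some.inj hhead)
          rw [hscan]
          obtain ⟨k0, k', rfl⟩ : ∃ a l, k = a :: l := by
            cases k with
            | nil => exact absurd rfl hkne
            | cons a l => exact ⟨a, l, rfl⟩
          have hpre2 : (k0 :: k') <+: k0 :: (k' ++ pvScan Tb r) := by
            rw [List.cons_prefix_cons]; exact ⟨rfl, List.prefix_append _ _⟩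
          rw [List.cons_append, pvRepl_cons_pos _ _ _ _ hpre2]
          have hdrop2 : (k' ++ pvScan Tb r).drop ((k0 :: k').length - 1) = pvScan Tb r := by
            simp
          have hrlen : r.length ≤ n := by
            have := congrArg List.length hr; simp at this hs; omega
          rw [hdrop2, ih r hrlen]
          have hp : (k0 :: k').isPrefixOf (c :: t) = true :=
            List.isPrefixOf_iff_prefix.mpr ⟨r, hr⟩
          have hfind' : (Tb ++ [((k0 :: k'), v)]).find? (fun e => e.1.isPrefixOf (c :: t))
              = some ((k0 :: k'), v) := by
            rw [List.find?_append, hfind]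
            simp [hp]
          rw [pvScan_cons_some _ c t _ hfind']
          have ht : t.drop ((k0 :: k').length - 1) = r := by
            have h3 : k0 :: (k' ++ r) = c :: t := by rw [← hr]; rfl
            have ht' : t = k' ++ r := by
              injection h3 with _ h4; exact h4.symm
            rw [ht']; simp
          rw [ht]
        · have hnot : ¬ k <+: c :: pvScan Tb t := by
            intro hpre
            apply hk
            obtain ⟨k0, k'', rfl⟩ : ∃ a l, k = a :: l := by
              cases k with
              | nil => exact absurd rfl hkne
              | cons a l => exact ⟨a, l, rfl⟩
            rw [List.cons_prefix_cons] at hpre ⊢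
            obtain ⟨rfl, hw⟩ := hpre
            refine ⟨rfl, ?_⟩
            rcases eq_or_ne k'' [] with rfl | hk''
            · simp
            · exact pv_prefix_scan Tb t.length t le_rfl k'' hk''
                (fun hmem => hke.2.2.2.1 (List.mem_cons_of_mem _ hmem)) hw
          have hfind' : (Tb ++ [(k, v)]).find? (fun e => e.1.isPrefixOf (c :: t)) = none := by
            rw [List.find?_append, hfind]
            simp [List.isPrefixOf_iff_prefix, hk]
          rw [pvScan_cons_none Tb c t hfind, pvRepl_cons_neg _ _ _ _ hnot,
            ih t (by simp at hs; omega), pvScan_cons_none _ c t hfind']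

lemma pvScan_empty_table : ∀ s : List Char, pvScan [] s = s := by
  intro s
  induction s with
  | nil => rw [pvScan_nil]
  | cons c t ih => rw [pvScan_cons_none [] c t (by simp), ih]

-- the whole sequential fold equals the one-pass scan
lemma pv_fold_eq_scan (Tb : List (List Char × List Char)) (hG : pvGood Tb) :
    ∀ s : List Char, Tb.foldl (fun l e => pvRepl e.1 (pvWrap e.2) l) s = pvScan Tb s := by
  induction Tb using List.reverseRecOn with
  | nil => intro s; simpa using (pvScan_empty_table s).symm
  | append_singleton T e ihT =>
    intro s
    rw [List.foldl_append]
    simp only [List.foldl_cons, List.foldl_nil]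
    rw [ihT (pvGood_append_left _ _ hG) s]
    exact pv_step T e.1 e.2 (by simpa using hG) s.length s le_rfl

-- String-level fold bridged down to List Char
lemma pv_bridge (ps : List (String × String)) :
    ∀ s : String,
      (ps.foldl (fun c kv => PySem.Str.replace c kv.1 ("<%= " ++ kv.2 ++ " %>")) s).toList
      = (ps.map (fun kv => (kv.1.toList, kv.2.toList))).foldl
          (fun l e => PySem.Chars.replace l e.1 (pvWrap e.2)) s.toList := by
  induction ps with
  | nil => intro s; simp
  | cons kv ps ih =>
    intro s
    simp only [List.foldl_cons, List.map_cons]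
    rw [ih]
    congr 1
    rw [PySem.Str.toList_replace]
    congr 1
    simp [pvWrap, String.toList_append]

lemma pv_fold_repl_eq (Tb : List (List Char × List Char)) (hTb : ∀ e ∈ Tb, e.1 ≠ []) :
    ∀ l : List Char,
      Tb.foldl (fun l e => PySem.Chars.replace l e.1 (pvWrap e.2)) l
      = Tb.foldl (fun l e => pvRepl e.1 (pvWrap e.2) l) l := by
  induction Tb with
  | nil => intro l; rfl
  | cons e T ih =>
    intro l
    simp only [List.foldl_cons]
    rw [pv_replace_eq _ _ _ (hTb e (by simp)), ih (fun e he => hTb e (by simp [he]))]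

-- port B's scanner is the generic scan on its table
set_option maxHeartbeats 1000000 in
lemma pvScanB_eq_pvScan : ∀ cs : List Char, pvScanB cs = pvScan pvTableB cs := by
  intro cs
  induction cs using pvScanB.induct with
  | case1 => rw [pvScanB, pvScan_nil]
  | case2 t e hfind ih =>
    have hstep : pvScanB ('$' :: t)
        = "<%= ".toList ++ e.2 ++ " %>".toList ++ pvScanB (t.drop (e.1.length - 1)) := by
      rw [pvScanB]; simp [hfind]
    rw [hstep, ih, pvScan_cons_some pvTableB '$' t e hfind]
    simp [pvWrap]
  | case3 t hfind ih =>
    have hstep : pvScanB ('$' :: t) = '$' :: pvScanB t := by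
      rw [pvScanB]; simp [hfind]
    rw [hstep, ih, pvScan_cons_none pvTableB '$' t hfind]
  | case4 c t hd ih =>
    have hstep : pvScanB (c :: t) = c :: pvScanB t := by
      rw [pvScanB]; simp [hd]
    have hfind : pvTableB.find? (fun e => e.1.isPrefixOf (c :: t)) = none := by
      rw [List.find?_eq_none]
      intro e he
      simp only [List.isPrefixOf_iff_prefix]
      intro hpre
      have hhd : ∀ e ∈ pvTableB, e.1.head? = some '$' := by decide
      have hene : e.1 ≠ [] := by
        intro hnil; have := hhd e he; rw [hnil] at this; simp at this
      have h2 := pv_prefix_head hene hpre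
      rw [hhd e he] at h2
      simp at h2
      exact hd h2
    rw [hstep, ih, pvScan_cons_none pvTableB c t hfind]

set_option maxHeartbeats 1000000 in
lemma pvGood_tableB : pvGood pvTableB := by
  unfold pvGood pvGoodE
  exact ⟨by decide, by decide⟩

set_option maxHeartbeats 1000000 in
lemma pvMap_eq : pvPairsA.map (fun kv => (kv.1.toList, kv.2.toList)) = pvTableB := by
  decide

-- ===== VERDICT (by name: the statement is the Claim_ definition above) =====
theorem convertSublimeVarsToShortcuts_py_spec : Claim_equal_convertSublimeVarsToShortcuts_py := by
  intro content _
  unfold Spec_convertSublimeVarsToShortcuts_py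
  have hA : convertSublimeVarsToShortcuts_py content
      = pvPairsA.foldl (fun c kv => PySem.Str.replace c kv.1 ("<%= " ++ kv.2 ++ " %>")) content := rfl
  have h : (pvPairsA.foldl
      (fun c kv => PySem.Str.replace c kv.1 ("<%= " ++ kv.2 ++ " %>")) content).toList
      = pvScanB content.toList := by
    rw [pv_bridge, pvMap_eq,
      pv_fold_repl_eq pvTableB (fun e he => (pvGood_tableB.1 e he).1),
      pv_fold_eq_scan pvTableB pvGood_tableB, pvScanB_eq_pvScan]
  rw [hA]
  unfold convertSublimeVarsToShortcuts_py_alt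
  have h2 := congrArg String.ofList h
  simpa using h2
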